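-- pv_equiv track=rewrite | github.com/dynotw/ECE143-HWs | gather.py | gather_values
-- ===== SOURCE A (Python) =====
-- def map_bitstring(x):
--     '''
--
--     :param x: input, list
--     :return: dict
--     '''
--
--     assert isinstance(x,list)
--     for i in x:
--         assert isinstance(i,str)
--
--     dict1=dict()
--
--     for i in x:
--         if i.count('0') > i.count('1'):
--             dict1[i]=0
--         else:
--             dict1[i]=1
--
--     return dict1
--
-- def gather_values(x):
--     '''
--
--     :param x: input, list
--     :return: dict
--     '''
--
--     # from gather import map_bitstring
--     from collections import Counter
--
--     assert isinstance(x,list)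
--     for i in x:
--         assert isinstance(i, str)
--
--     num=Counter(x)
--
--     val=map_bitstring(x)
--
--     for key,value in num.items():
--         list1=[]
--         list1.append(val[key])
--         val[key]=list1*value
--
--     return val
-- ===== SOURCE B (Python) =====
-- def gather_values(x):
--     '''
--     :param x: input, list
--     :return: dict
--     '''
--     assert isinstance(x, list)
--     for i in x:
--         assert isinstance(i, str)
--
--     result = {}
--     for i in x:
--         bit = 0 if i.count('0') > i.count('1') else 1
--         result.setdefault(i, []).append(bit)
--     return result
-- ===== Notes on version B (the rewrite author's own statement) =====
-- stated objective: simpler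
-- what changed: Replaces A's three phases (Counter over x, a separate map_bitstring dict, then a rewrite loop multiplying singleton lists) by one single pass that computes each string's majority bit and appends it to a setdefault-created per-key list.
import Mathlib
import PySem

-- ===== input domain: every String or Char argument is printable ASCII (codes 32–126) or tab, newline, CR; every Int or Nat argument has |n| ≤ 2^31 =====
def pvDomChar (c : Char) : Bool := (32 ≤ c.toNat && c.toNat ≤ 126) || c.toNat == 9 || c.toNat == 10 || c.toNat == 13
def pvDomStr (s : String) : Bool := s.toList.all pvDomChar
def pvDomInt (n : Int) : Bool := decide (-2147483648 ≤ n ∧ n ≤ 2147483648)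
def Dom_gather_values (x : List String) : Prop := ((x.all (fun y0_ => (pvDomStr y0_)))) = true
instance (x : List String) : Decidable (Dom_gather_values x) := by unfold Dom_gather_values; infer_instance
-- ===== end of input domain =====

-- B replaces A's three phases (Counter, map_bitstring, then a loop multiplying singleton
-- lists) by one pass appending each string's majority bit via setdefault: simpler.

-- ===== PORT A =====
def map_bitstring (x : List String) : PySem.Dict String Int :=
  x.foldl (fun dict1 i =>
      if PySem.Str.count i "0" > PySem.Str.count i "1" then dict1.insert i 0
      else dict1.insert i 1)
    PySem.Dict.empty

-- A's last loop mutates val : dict in place, changing each value from int to list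
-- (heterogeneous in Python).  Ported by rebuilding the dict: the loop visits
-- num.items, whose keys are exactly val's keys in val's insertion order (both are
-- the first occurrences in x), so inserting in that order yields the same items;
-- 'val[key]' always succeeds in A (key ∈ val), ported as getD with unused default.
def gather_values (x : List String) : List (String × List Int) :=
  let num := PySem.Dict.counter x
  let val := map_bitstring x
  (num.items.foldl (fun acc kv =>
      let list1 : List Int := [val.getD kv.1 0]
      acc.insert kv.1 (PySem.List.pyRepeat list1 kv.2)) PySem.Dict.empty).items

-- ===== PORT B =====
def gather_values_alt (x : List String) : List (String × List Int) :=
  -- result.setdefault(i, []).append(bit)  ==  result[i] = result.get(i, []) + [bit]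
  (x.foldl (fun result i =>
      let bit : Int := if PySem.Str.count i "0" > PySem.Str.count i "1" then 0 else 1
      result.modify i [] (· ++ [bit]))
    PySem.Dict.empty).items

-- ===== PRECONDITION & SPEC =====
def Spec_gather_values (x : List String) (out : List (String × List Int)) : Prop := out = gather_values_alt x
instance (x : List String) (out : List (String × List Int)) : Decidable (Spec_gather_values x out) := by unfold Spec_gather_values; infer_instance

-- ===== CLAIM (what is proved, stated in full; the proofs are below) =====
def Claim_equal_gather_values : Prop := ∀ (x : List String), Dom_gather_values x → Spec_gather_values x (gather_values x)

-- ===== LEMMAS AND PROOFS =====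

-- the majority bit both programs compute for a string
def pvBit (i : String) : Int :=
  if PySem.Str.count i "0" > PySem.Str.count i "1" then 0 else 1

-- the common canonical value: first-occurrence keys, each with its bit repeated count times
def pvCanon (x : List String) : List (String × List Int) :=
  (PySem.Set.ofList x).map (fun k => (k, List.replicate (x.count k) (pvBit k)))

-- ---- B side ----

def pvD (x : List String) : PySem.Dict String (List Int) :=
  x.foldl (fun result i => result.modify i [] (· ++ [pvBit i])) PySem.Dict.empty

theorem pvD_keys (x : List String) : (pvD x).keys = PySem.Set.ofList x := by
  unfold pvD
  rw [PySem.Dict.keys_foldl_modify]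
  simp [PySem.Set.update_nil_left, PySem.Dict.keys_empty]

theorem pvD_getD (x : List String) (k : String) :
    (pvD x).getD k [] = List.replicate (x.count k) (pvBit k) := by
  unfold pvD
  rw [← List.foldl_map (f := fun i => (i, pvBit i))
        (g := fun (d : PySem.Dict String (List Int)) p => d.modify p.1 [] (· ++ [p.2])),
      PySem.Dict.getD_foldl_modify_append]
  rw [List.filter_map]
  have : ((fun p : String × Int => p.1 == k) ∘ fun i => (i, pvBit i)) = (fun i => i == k) := rfl
  rw [this, List.filter_beq, List.map_replicate]
  simp [PySem.Dict.getD_empty]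

theorem alt_eq_canon (x : List String) : gather_values_alt x = pvCanon x := by
  have h : gather_values_alt x = (pvD x).items := by
    unfold gather_values_alt pvD pvBit; rfl
  rw [h, PySem.Dict.items_eq_map_keys _ (by rw [pvD_keys]; exact PySem.Set.nodup_ofList x) []]
  rw [pvD_keys]; unfold pvCanon
  exact List.map_congr_left (fun k _ => by rw [pvD_getD])

-- ---- A side ----

theorem map_bitstring_eq (x : List String) :
    map_bitstring x = x.foldl (fun d i => d.insert i (pvBit i)) PySem.Dict.empty := by
  unfold map_bitstring pvBit
  congr 1; funext d i
  rw [apply_ite (d.insert i)]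

theorem getD_foldl_insert_bit (x : List String) (d : PySem.Dict String Int) (k : String)
    (hk : k ∈ x) :
    (x.foldl (fun d i => d.insert i (pvBit i)) d).getD k 0 = pvBit k := by
  induction x using List.reverseRecOn with
  | nil => cases hk
  | append_singleton xs i ih =>
    rw [List.foldl_append, List.foldl_cons, List.foldl_nil]
    by_cases h : k = i
    · subst h; rw [PySem.Dict.getD_insert_self]
    · rw [PySem.Dict.getD_insert_of_ne _ _ _ h]
      exact ih (by rcases List.mem_append.1 hk with h' | h' <;> simp_all)

theorem a_eq_canon (x : List String) : gather_values x = pvCanon x := by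
  show ((PySem.Dict.counter x).items.foldl
      (fun acc kv => acc.insert kv.1 (PySem.List.pyRepeat [(map_bitstring x).getD kv.1 0] kv.2))
      PySem.Dict.empty).items = pvCanon x
  rw [map_bitstring_eq, PySem.Dict.items_counter, List.foldl_map]
  show ((PySem.Set.ofList x).foldl
      (fun acc k => acc.insert k (PySem.List.pyRepeat
        [(x.foldl (fun d i => d.insert i (pvBit i)) PySem.Dict.empty).getD k 0]
        (x.count k : Int)))
      PySem.Dict.empty).items = pvCanon x
  rw [PySem.Dict.items_foldl_insert_fresh (PySem.Set.ofList x) (fun k => k)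
        (fun k => PySem.List.pyRepeat
          [(x.foldl (fun d i => d.insert i (pvBit i)) PySem.Dict.empty).getD k 0]
          (x.count k : Int))
        PySem.Dict.empty
        (fun a _ => PySem.Dict.contains_empty a)
        (by rw [List.map_id']; exact PySem.Set.nodup_ofList x)]
  have hemp : (PySem.Dict.empty : PySem.Dict String (List Int)).items = [] := rfl
  rw [hemp, List.nil_append]
  unfold pvCanon
  refine List.map_congr_left (fun k hk => ?_)
  have hkx : k ∈ x := by simpa using hk
  rw [getD_foldl_insert_bit x PySem.Dict.empty k hkx, PySem.List.pyRepeat_singleton]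
  simp

-- ===== VERDICT (by name: the statement is the Claim_ definition above) =====
theorem gather_values_spec : Claim_equal_gather_values := by
  intro x _
  show gather_values x = gather_values_alt x
  rw [a_eq_canon, alt_eq_canon]
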